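-- pv_equiv track=rewrite | github.com/etkakocak/PythonHashBST | tasks/part1_main.py | most_used_words
-- ===== SOURCE A (Python) =====
-- def most_used_words(lst):
--     lst = [x for x in lst if len(x) >= 4] # Rebuilding the list with only words larger than 4
--     dic = {} # Creating an empty dictionary
--     for x in lst: # Adding strings in list to dictionary with values of how many times each of them exist in list
--         if x not in dic:
--             dic[x] = 0
--         dic[x] += 1
--     sor = sorted(dic.items(), key=lambda x: (-x[1], x[0])) # Sorting the dictionary, items with largest value first
--     return sor # Returns sorted dictionary
-- ===== SOURCE B (Python) =====
-- def most_used_words(lst):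
--     counts = {}
--     for x in lst:
--         if len(x) >= 4:
--             counts[x] = counts.get(x, 0) + 1
--     buckets = {}
--     for w, c in counts.items():
--         buckets.setdefault(c, []).append(w)
--     out = []
--     for c in sorted(buckets, reverse=True):
--         for w in sorted(buckets[c]):
--             out.append((w, c))
--     return out
-- ===== Notes on version B (the rewrite author's own statement) =====
-- stated objective: alternative
-- what changed: Replaces A's single lexicographic tuple-key sort of the dict items by an inverted count->words bucket index traversed in descending count order with each bucket sorted alphabetically, and counts in one filtered pass instead of rebuilding the list first.
import Mathlib
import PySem

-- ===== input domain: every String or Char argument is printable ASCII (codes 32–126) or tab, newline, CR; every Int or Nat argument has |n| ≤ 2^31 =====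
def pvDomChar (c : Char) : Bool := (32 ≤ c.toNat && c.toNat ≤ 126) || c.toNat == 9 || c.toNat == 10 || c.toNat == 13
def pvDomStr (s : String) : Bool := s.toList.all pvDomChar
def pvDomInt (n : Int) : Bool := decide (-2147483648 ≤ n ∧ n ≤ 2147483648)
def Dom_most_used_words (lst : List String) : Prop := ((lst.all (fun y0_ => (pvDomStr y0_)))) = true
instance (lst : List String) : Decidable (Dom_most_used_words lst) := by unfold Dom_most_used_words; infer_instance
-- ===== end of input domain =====

-- B replaces A's single lexicographic tuple-key sort by an inverted count→words bucket
-- index traversed in descending count order, alphabetically inside each bucket (alternative decomposition, same cost).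

-- ===== PORT A =====
def most_used_words (lst : List String) : List (String × Int) :=
  let lst2 := lst.filter (fun x => 4 ≤ PySem.Str.len x)
  let dic := lst2.foldl (fun d x =>
      let d := if d.contains x = false then d.insert x 0 else d
      d.insert x (d.getD x 0 + 1)) PySem.Dict.empty
  PySem.List.sorted2 dic.items (fun p => -p.2) (fun p => p.1)

-- ===== PORT B =====
def most_used_words_alt (lst : List String) : List (String × Int) :=
  let counts := lst.foldl (fun d x =>
      if 4 ≤ PySem.Str.len x then d.insert x (d.getD x 0 + 1) else d) PySem.Dict.empty
  let buckets := counts.items.foldl (fun b p => b.modify p.2 [] (· ++ [p.1]))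
      (PySem.Dict.empty : PySem.Dict Int (List String))
  (PySem.List.sorted buckets.keys (fun c => c) true).foldl (fun out c =>
      (PySem.List.sorted (buckets.getD c []) (fun w => w)).foldl
        (fun out w => out ++ [(w, c)]) out) []

-- ===== PRECONDITION & SPEC =====
def Spec_most_used_words (lst : List String) (out : List (String × Int)) : Prop := out = most_used_words_alt lst
instance (lst : List String) (out : List (String × Int)) : Decidable (Spec_most_used_words lst out) := by unfold Spec_most_used_words; infer_instance

-- ===== CLAIM (what is proved, stated in full; the proofs are below) =====
def Claim_equal_most_used_words : Prop := ∀ (lst : List String), Dom_most_used_words lst → Spec_most_used_words lst (most_used_words lst)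

-- ===== LEMMAS AND PROOFS =====

-- sorted2 with keys k1, k2 is sorted with the lexicographic key x ↦ (k1 x, k2 x)
theorem pv_sorted2_eq_sorted_lex {α : Type} (xs : List α) (k1 : α → Int) (k2 : α → String) :
    PySem.List.sorted2 xs k1 k2 = PySem.List.sorted xs (fun x => toLex (k1 x, k2 x)) := by
  unfold PySem.List.sorted2 PySem.List.sorted
  simp only [if_neg (by decide : ¬ (false = true))]
  congr 1
  funext acc x
  congr 1
  funext a b
  rcases lt_trichotomy (k1 a) (k1 b) with h | h | h
  · simp [h, Prod.Lex.lt_iff, not_lt.mpr (le_of_lt h)]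
  · simp [h, Prod.Lex.lt_iff]
  · simp [Prod.Lex.lt_iff, not_lt.mpr (le_of_lt h), h.ne']
    intro h'; exact absurd h' (not_le.mpr h)

-- A's counting loop is Counter
theorem pv_A_dic_eq_counter (ws : List String) :
    ws.foldl (fun d x =>
      let d := if d.contains x = false then d.insert x 0 else d
      d.insert x (d.getD x 0 + 1)) PySem.Dict.empty = PySem.Dict.counter ws := by
  unfold PySem.Dict.counter
  apply PySem.List.foldl_congr_mem
  intro d x _
  simp only [PySem.Dict.modify]
  by_cases h : d.contains x = false
  · simp [h, PySem.Dict.getD_insert_self, PySem.Dict.insert_insert_self,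
      PySem.Dict.getD_of_not_contains d 0 h]
  · simp [h]

-- partitioning a list by its key values, bucket by distinct key, is a permutation
theorem pv_flatMap_filter_perm {α κ : Type} [DecidableEq κ] (f : α → κ) :
    ∀ (D : List κ) (l : List α), D.Nodup → (∀ p ∈ l, f p ∈ D) →
    (D.flatMap (fun c => l.filter (fun p => f p = c))).Perm l := by
  intro D
  induction D with
  | nil =>
    intro l _ h
    simp only [List.flatMap_nil]
    cases l with
    | nil => exact List.Perm.refl _
    | cons a t => exact absurd (h a (by simp)) (by simp)
  | cons c D' ih =>
    intro l hnd hmem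
    simp only [List.flatMap_cons]
    have key : ∀ c' ∈ D', l.filter (fun p => f p = c') =
        (l.filter (fun p => ¬ (f p = c))).filter (fun p => f p = c') := by
      intro c' hc'
      rw [List.filter_filter]
      apply List.filter_congr
      intro p _
      have hne : c' ≠ c := fun e => (List.nodup_cons.mp hnd).1 (e ▸ hc')
      by_cases hp : f p = c'
      · simp [hp, hne]
      · simp [hp]
    have hrw : D'.flatMap (fun c' => l.filter (fun p => f p = c'))
        = D'.flatMap (fun c' => (l.filter (fun p => ¬ (f p = c))).filter (fun p => f p = c')) :=
      List.flatMap_congr (by intro c' hc'; exact key c' hc')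
    rw [hrw]
    have ihp := ih (l.filter (fun p => ¬ (f p = c))) (List.nodup_cons.mp hnd).2 (by
      intro p hp
      simp only [List.mem_filter, decide_eq_true_eq] at hp
      have := hmem p hp.1
      simp only [List.mem_cons] at this
      exact this.resolve_left hp.2)
    refine List.Perm.trans (ihp.append_left _) ?_
    have := List.filter_append_perm (fun p => decide (f p = c)) l
    simpa using this

theorem pv_core (I : List (String × Int)) (hnd : (I.map (·.1)).Nodup) :
    PySem.List.sorted I (fun p => toLex (-p.2, p.1)) =
    (PySem.List.sorted (PySem.Set.ofList (I.map (·.2))) (fun c => c) true).flatMap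
      (fun c => (PySem.List.sorted ((I.filter (fun p => p.2 == c)).map (·.1)) (fun w => w)).map
        (fun w => (w, c))) := by
  set Kset : List Int := PySem.Set.ofList (I.map (·.2)) with hKset
  set K := PySem.List.sorted Kset (fun c => c) true with hKdef
  have hfilt : ∀ c : Int, I.filter (fun p => p.2 == c) = I.filter (fun p => decide (p.2 = c)) := by
    intro c; apply List.filter_congr; intro p _; rfl
  apply PySem.List.sorted_eq_of_perm_of_pairwise_lt
  · -- permutation
    have h1 : ∀ c ∈ K, ((PySem.List.sorted ((I.filter (fun p => p.2 == c)).map (·.1)) (fun w => w)).map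
        (fun w => (w, c))).Perm (I.filter (fun p => p.2 == c)) := by
      intro c _
      refine ((PySem.List.sorted_perm _ _ _).map _).trans ?_
      rw [List.map_map]
      have he : ∀ p ∈ I.filter (fun p => p.2 == c), ((fun w => (w, c)) ∘ (fun p => p.1)) p = p := by
        intro p hp
        have h2 := (List.mem_filter.mp hp).2
        simp only [beq_iff_eq] at h2
        simp [Function.comp, ← h2]
      rw [List.map_congr_left he]; simp
    refine (List.Perm.flatMap_left K h1).trans ?_
    refine (List.Perm.flatMap_right _ (PySem.List.sorted_perm Kset (fun c => c) true)).trans ?_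
    have := pv_flatMap_filter_perm (fun p : String × Int => p.2) Kset I
      (hKset ▸ PySem.Set.nodup_ofList _)
      (by intro p hp; rw [hKset, PySem.Set.mem_ofList]; exact List.mem_map_of_mem hp)
    refine List.Perm.trans ?_ this
    apply List.Perm.of_eq
    apply List.flatMap_congr
    intro c _
    rw [hfilt c]
  · -- pairwise strict lex
    rw [List.pairwise_flatMap]
    constructor
    · intro c _
      rw [List.pairwise_map]
      have hsub : ((I.filter (fun p => p.2 == c)).map (·.1)).Sublist (I.map (·.1)) :=
        List.Sublist.map _ List.filter_sublist
      have hnodup : (PySem.List.sorted ((I.filter (fun p => p.2 == c)).map (·.1)) (fun w => w)).Nodup :=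
        ((PySem.List.sorted_perm _ _ _).nodup_iff).mpr (hnd.sublist hsub)
      have hle := PySem.List.sorted_pairwise ((I.filter (fun p => p.2 == c)).map (·.1)) (fun w => w)
      refine (hle.and hnodup).imp (fun h => ?_)
      simp only [Prod.Lex.lt_iff, ofLex_toLex]
      exact Or.inr ⟨trivial, lt_of_le_of_ne h.1 h.2⟩
    · have hK : K.Pairwise (fun a b => b < a) := by
        have h1 := PySem.List.sorted_pairwise_rev Kset (fun c => c)
        have h2 : K.Nodup :=
          ((PySem.List.sorted_perm _ _ _).nodup_iff).mpr (hKset ▸ PySem.Set.nodup_ofList _)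
        exact (h1.and h2).imp (fun h => lt_of_le_of_ne h.1 (Ne.symm h.2))
      refine hK.imp ?_
      intro c₁ c₂ hlt x hx y hy
      obtain ⟨w₁, _, rfl⟩ := List.mem_map.mp hx
      obtain ⟨w₂, _, rfl⟩ := List.mem_map.mp hy
      simp only [Prod.Lex.lt_iff, ofLex_toLex]
      exact Or.inl (by simpa using hlt)

-- B's output shape: flatMap over the reverse-sorted distinct counts of the sorted buckets
theorem pv_B_shape (ws : List String) :
    (let counts := PySem.Dict.counter ws
     let buckets := counts.items.foldl (fun b p => b.modify p.2 [] (· ++ [p.1]))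
        (PySem.Dict.empty : PySem.Dict Int (List String))
     (PySem.List.sorted buckets.keys (fun c => c) true).foldl (fun out c =>
        (PySem.List.sorted (buckets.getD c []) (fun w => w)).foldl
          (fun out w => out ++ [(w, c)]) out) [])
    = (PySem.List.sorted (PySem.Set.ofList ((PySem.Dict.counter ws).items.map (·.2))) (fun c => c) true).flatMap
        (fun c => (PySem.List.sorted (((PySem.Dict.counter ws).items.filter (fun p => p.2 == c)).map (·.1)) (fun w => w)).map
          (fun w => (w, c))) := by
  have hb_keys : ((PySem.Dict.counter ws).items.foldl (fun b p => b.modify p.2 [] (· ++ [p.1]))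
      (PySem.Dict.empty : PySem.Dict Int (List String))).keys
      = PySem.Set.ofList ((PySem.Dict.counter ws).items.map (·.2)) := by
    rw [PySem.Dict.keys_foldl_modify_key (PySem.Dict.counter ws).items (fun p => p.2) []
      (fun _ p => (· ++ [p.1])) PySem.Dict.empty]
    rfl
  have hb_getD : ∀ c : Int, ((PySem.Dict.counter ws).items.foldl (fun b p => b.modify p.2 [] (· ++ [p.1]))
      (PySem.Dict.empty : PySem.Dict Int (List String))).getD c []
      = (((PySem.Dict.counter ws).items.filter (fun p => p.2 == c)).map (·.1)) := by
    intro c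
    have hswap : (PySem.Dict.counter ws).items.foldl (fun b p => b.modify p.2 [] (· ++ [p.1]))
        (PySem.Dict.empty : PySem.Dict Int (List String))
        = ((PySem.Dict.counter ws).items.map Prod.swap).foldl
            (fun b q => b.modify q.1 [] (· ++ [q.2]))
            (PySem.Dict.empty : PySem.Dict Int (List String)) := by
      rw [List.foldl_map]
      rfl
    rw [hswap, PySem.Dict.getD_foldl_modify_append, List.filter_map, List.map_map]
    rfl
  simp only [PySem.List.foldl_append_singleton_eq_map, PySem.List.foldl_append_eq_flatMap,
    List.nil_append, hb_keys, hb_getD]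

-- main equality
theorem pv_main (lst : List String) : most_used_words lst = most_used_words_alt lst := by
  unfold most_used_words most_used_words_alt
  simp only [pv_A_dic_eq_counter,
    PySem.List.foldl_ite_eq_foldl_filter (p := fun x => 4 ≤ PySem.Str.len x)
      (f := fun (d : PySem.Dict String Int) x => d.insert x (d.getD x 0 + 1)),
    PySem.Dict.foldl_insert_getD_add_one_eq_counter]
  rw [pv_sorted2_eq_sorted_lex, pv_B_shape]
  exact pv_core _ (PySem.Dict.nodup_keys_counter _)

-- ===== VERDICT (by name: the statement is the Claim_ definition above) =====
theorem most_used_words_spec : Claim_equal_most_used_words := by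
  intro lst _
  unfold Spec_most_used_words
  exact pv_main lst
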